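-- pv_equiv track=rewrite | github.com/luotong1995/leetcode | python/2352equalPairs/main.py | equalPairs2
-- ===== SOURCE A (Python) =====
-- from typing import List
--
-- def equalPairs2(grid: List[List[int]]) -> int:
--     n = len(grid)
--     rows = []
--     cols = []
--     a_dict = {}
--     res = 0
--     for i in range(n):
--         rows.append(grid[i])
--     for i in range(n):
--         cols.append([grid[j][i] for j in range(n)])
--
--     for item in rows:
--         key = ','.join([str(i) for i in item])
--         a_dict[key] = a_dict.get(key, 0) + 1
--
--     for item in cols:
--         key = ','.join([str(i) for i in item])
--         if key in a_dict:
--             res += a_dict[key]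
--
--     return res
-- ===== SOURCE B (Python) =====
-- from typing import List
--
-- def equalPairs2(grid: List[List[int]]) -> int:
--     n = len(grid)
--     res = 0
--     for j in range(n):
--         col = [grid[k][j] for k in range(n)]
--         for row in grid:
--             if row == col:
--                 res += 1
--     return res
-- ===== Notes on version B (the rewrite author's own statement) =====
-- stated objective: simpler
-- what changed: B drops A's string-key hash table entirely and counts equal row/column pairs by direct nested list comparison: for each column index it builds the column once and compares every row against it.
import Mathlib
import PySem

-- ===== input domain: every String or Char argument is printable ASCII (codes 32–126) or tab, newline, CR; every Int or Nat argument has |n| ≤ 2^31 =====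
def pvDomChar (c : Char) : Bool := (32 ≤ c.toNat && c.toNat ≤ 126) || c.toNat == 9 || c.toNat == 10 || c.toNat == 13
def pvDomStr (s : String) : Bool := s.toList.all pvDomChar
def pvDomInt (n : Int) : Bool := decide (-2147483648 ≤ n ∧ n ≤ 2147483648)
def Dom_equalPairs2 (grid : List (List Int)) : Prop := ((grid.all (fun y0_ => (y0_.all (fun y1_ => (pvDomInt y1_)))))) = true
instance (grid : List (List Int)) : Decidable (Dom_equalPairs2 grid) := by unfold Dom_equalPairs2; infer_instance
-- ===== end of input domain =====

-- B replaces A's string-keyed counting dict by direct nested row/column list comparison (simpler: no keys, no hash table).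

-- ===== PORT A =====
-- key = ','.join([str(i) for i in item])
def pvKeyA (item : List Int) : String :=
  PySem.Str.join "," (item.map (fun i => PySem.Int.toStr i))

-- Literal port of A. grid[i] / grid[j][i] are ported with getD: under Pre_ every index is a
-- nonnegative in-range index, where getD is exactly Python's indexing (out of range Python raises; excluded by Pre_).
def equalPairs2 (grid : List (List Int)) : Int :=
  let n := grid.length
  let rows := (List.range n).foldl (fun acc i => acc ++ [grid.getD i []]) []
  let cols := (List.range n).foldl (fun acc i =>
      acc ++ [(List.range n).map (fun j => (grid.getD j []).getD i 0)]) []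
  let aDict := rows.foldl (fun (d : PySem.Dict String Int) item =>
      d.insert (pvKeyA item) (d.getD (pvKeyA item) 0 + 1)) PySem.Dict.empty
  let res := cols.foldl (fun res item =>
      if aDict.contains (pvKeyA item) then res + aDict.getD (pvKeyA item) 0 else res) 0
  res

-- ===== PORT B =====
-- Literal port of B (Source B); same getD convention for the in-range indices under Pre_.
def equalPairs2_alt (grid : List (List Int)) : Int :=
  let n := grid.length
  (List.range n).foldl (fun res j =>
    let col := (List.range n).map (fun k => (grid.getD k []).getD j 0)
    grid.foldl (fun r row => if row == col then r + 1 else r) res) 0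

-- ===== PRECONDITION & SPEC =====
-- Pre_ excludes exactly the grids on which the Python A raises IndexError (some row shorter than the
-- number of rows, so some grid[j][i] is out of range); B's Python raises there too.
def Pre_equalPairs2 (grid : List (List Int)) : Prop :=
  ∀ row ∈ grid, grid.length ≤ row.length
instance (grid : List (List Int)) : Decidable (Pre_equalPairs2 grid) := by unfold Pre_equalPairs2; infer_instance

def pvWitness_equalPairs2 : List (List Int) := [[3, 2], [2, 3]]

def Spec_equalPairs2 (grid : List (List Int)) (out : Int) : Prop := out = equalPairs2_alt grid
instance (grid : List (List Int)) (out : Int) : Decidable (Spec_equalPairs2 grid out) := by unfold Spec_equalPairs2; infer_instance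

-- ===== CLAIM (what is proved, stated in full; the proofs are below) =====
def Claim_equal_equalPairs2 : Prop := ∀ (grid : List (List Int)), Dom_equalPairs2 grid → Pre_equalPairs2 grid → Spec_equalPairs2 grid (equalPairs2 grid)

-- ===== LEMMAS AND PROOFS =====

-- the base-10 value of a digit string: reading Nat.toDigits back with a fold
def pvDigitsVal (a : Nat) (cs : List Char) : Nat :=
  cs.foldl (fun a c => 10 * a + (c.toNat - 48)) a

theorem pvDigitsVal_toDigits (n : Nat) : ∀ a,
    pvDigitsVal a (Nat.toDigits 10 n) = a * 10 ^ (Nat.toDigits 10 n).length + n := by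
  induction n using Nat.strong_induction_on with
  | _ n ih =>
    intro a
    by_cases h : n < 10
    · rw [Nat.toDigits_of_lt_base h]
      have hc : (Nat.digitChar n).toNat = 48 + n := by interval_cases n <;> decide
      simp [pvDigitsVal, hc]
      omega
    · have h10 : (10 : Nat) * (n / 10) + n % 10 = n := by omega
      have hsplit := Nat.toDigits_append_toDigits (b := 10) (n := n / 10) (d := n % 10)
        (by omega) (by omega) (by omega)
      rw [h10] at hsplit
      rw [← hsplit]
      rw [Nat.toDigits_of_lt_base (show n % 10 < 10 by omega)]
      have hc : (Nat.digitChar (n % 10)).toNat = 48 + n % 10 := by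
        have h2 : n % 10 < 10 := by omega
        interval_cases h3 : (n % 10) <;> decide
      simp only [pvDigitsVal, List.foldl_append, List.length_append, List.length_cons,
        List.length_nil, List.foldl_cons, List.foldl_nil]
      have ihq := ih (n / 10) (by omega) a
      simp only [pvDigitsVal] at ihq
      rw [ihq]
      rw [hc, pow_succ]
      ring_nf
      omega

theorem pvToDigits10_inj : Function.Injective (Nat.toDigits 10) := by
  intro m n h
  have hm := pvDigitsVal_toDigits m 0
  have hn := pvDigitsVal_toDigits n 0
  rw [h] at hm
  simp at hm hn
  omega

theorem pvToChars_inj : Function.Injective PySem.Int.toChars := by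
  intro a b h
  unfold PySem.Int.toChars at h
  split_ifs at h with ha hb hb
  · have := pvToDigits10_inj (List.cons_injective.eq_iff.mp h)
    omega
  · exfalso
    have hmem : '-' ∈ Nat.toDigits 10 b.toNat := by rw [← h]; exact List.mem_cons_self
    have := Nat.isDigit_of_mem_toDigits (by omega) (by omega) hmem
    simp [Char.isDigit] at this
  · exfalso
    have hmem : '-' ∈ Nat.toDigits 10 a.toNat := by rw [h]; exact List.mem_cons_self
    have := Nat.isDigit_of_mem_toDigits (by omega) (by omega) hmem
    simp [Char.isDigit] at this
  · have := pvToDigits10_inj h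
    omega

theorem pvToChars_ne_nil (n : Int) : PySem.Int.toChars n ≠ [] := by
  unfold PySem.Int.toChars
  split_ifs
  · simp
  · have := Nat.length_toDigits_pos (b := 10) (n := n.toNat)
    intro h; rw [h] at this; simp at this

theorem pvToChars_no_comma (n : Int) : ',' ∉ PySem.Int.toChars n := by
  unfold PySem.Int.toChars
  intro hmem
  split_ifs at hmem
  · rcases List.mem_cons.mp hmem with h | h
    · exact absurd h (by decide)
    · have := Nat.isDigit_of_mem_toDigits (b := 10) (by omega) (by omega) h
      simp [Char.isDigit] at this
  · have := Nat.isDigit_of_mem_toDigits (b := 10) (by omega) (by omega) hmem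
    simp [Char.isDigit] at this

-- splitting at the first separator is unambiguous when the heads are comma-free
theorem pvSepSplit : ∀ (p q u v : List Char), ',' ∉ p → ',' ∉ q →
    p ++ ',' :: u = q ++ ',' :: v → p = q ∧ u = v := by
  intro p
  induction p with
  | nil =>
    intro q u v _ hq h
    cases q with
    | nil => simpa using h
    | cons c q' =>
      simp at h
      exact absurd (h.1 ▸ List.mem_cons_self) hq
  | cons c p' ih =>
    intro q u v hp hq h
    cases q with
    | nil =>
      simp at h
      exact absurd (h.1 ▸ List.mem_cons_self) hp
    | cons d q' =>
      simp at h
      obtain ⟨hcd, hrest⟩ := h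
      have := ih q' u v (fun hm => hp (List.mem_cons_of_mem _ hm))
        (fun hm => hq (List.mem_cons_of_mem _ hm)) hrest
      simp [hcd, this.1, this.2]

theorem pvJoin_inj : ∀ (ps qs : List (List Char)),
    (∀ x ∈ ps, x ≠ [] ∧ ',' ∉ x) → (∀ x ∈ qs, x ≠ [] ∧ ',' ∉ x) →
    PySem.Chars.join [','] ps = PySem.Chars.join [','] qs → ps = qs := by
  intro ps
  induction ps with
  | nil =>
    intro qs _ hq h
    cases qs with
    | nil => rfl
    | cons q qs' =>
      exfalso
      have hqne := (hq q List.mem_cons_self).1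
      cases qs' with
      | nil => rw [PySem.Chars.join_nil, PySem.Chars.join_singleton] at h; exact hqne h.symm
      | cons q' rest =>
        rw [PySem.Chars.join_nil, PySem.Chars.join_cons_cons] at h
        cases q with
        | nil => exact hqne rfl
        | cons c cs => simp at h
  | cons p ps' ih =>
    intro qs hp hq h
    have hpne := (hp p List.mem_cons_self).1
    have hpnc := (hp p List.mem_cons_self).2
    cases qs with
    | nil =>
      exfalso
      cases ps' with
      | nil => rw [PySem.Chars.join_nil, PySem.Chars.join_singleton] at h; exact hpne h
      | cons p' rest =>
        rw [PySem.Chars.join_nil, PySem.Chars.join_cons_cons] at h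
        cases p with
        | nil => exact hpne rfl
        | cons c cs => simp at h
    | cons q qs' =>
      have hqne := (hq q List.mem_cons_self).1
      have hqnc := (hq q List.mem_cons_self).2
      cases ps' with
      | nil =>
        cases qs' with
        | nil =>
          rw [PySem.Chars.join_singleton, PySem.Chars.join_singleton] at h
          rw [h]
        | cons q' rest =>
          exfalso
          rw [PySem.Chars.join_singleton, PySem.Chars.join_cons_cons] at h
          apply hpnc
          rw [h]
          simp
      | cons p' prest =>
        cases qs' with
        | nil =>
          exfalso
          rw [PySem.Chars.join_singleton, PySem.Chars.join_cons_cons] at h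
          apply hqnc
          rw [← h]
          simp
        | cons q' qrest =>
          rw [PySem.Chars.join_cons_cons, PySem.Chars.join_cons_cons] at h
          simp only [List.append_assoc, List.singleton_append] at h
          obtain ⟨hpq, hrest⟩ := pvSepSplit p q _ _ hpnc hqnc h
          have := ih (q' :: qrest) (fun x hx => hp x (List.mem_cons_of_mem _ hx))
            (fun x hx => hq x (List.mem_cons_of_mem _ hx)) hrest
          rw [hpq, this]

-- A's row key ','.join(map(str, item)) determines the row: str(int) is injective, nonempty, comma-free
theorem pvKeyA_inj : Function.Injective pvKeyA := by
  intro r c h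
  have h' := congrArg String.toList h
  unfold pvKeyA at h'
  rw [PySem.Str.toList_join, PySem.Str.toList_join] at h'
  simp only [List.map_map, Function.comp_def, PySem.Int.toList_toStr] at h'
  have hsep : ("," : String).toList = [','] := by decide
  rw [hsep] at h'
  have hmaps := pvJoin_inj _ _
    (by intro x hx; obtain ⟨i, _, rfl⟩ := List.mem_map.mp hx
        exact ⟨pvToChars_ne_nil i, pvToChars_no_comma i⟩)
    (by intro x hx; obtain ⟨i, _, rfl⟩ := List.mem_map.mp hx
        exact ⟨pvToChars_ne_nil i, pvToChars_no_comma i⟩) h'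
  exact List.map_injective_iff.mpr pvToChars_inj hmaps

-- A's rows list is grid itself
theorem pvMapGetDRange (grid : List (List Int)) :
    (List.range grid.length).map (fun i => grid.getD i []) = grid := by
  apply List.ext_getElem (by simp)
  intro i h1 h2
  simp [List.getD_eq_getElem?_getD, List.getElem?_eq_getElem h2]

theorem pvMainEq (grid : List (List Int)) : equalPairs2 grid = equalPairs2_alt grid := by
  unfold equalPairs2 equalPairs2_alt
  simp only [PySem.List.foldl_append_singleton_eq_map, List.nil_append]
  rw [pvMapGetDRange]
  rw [show (fun (d : PySem.Dict String Int) item =>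
      d.insert (pvKeyA item) (d.getD (pvKeyA item) 0 + 1)) =
      (fun d item => (fun (d : PySem.Dict String Int) k => d.insert k (d.getD k 0 + 1)) d (pvKeyA item)) from rfl]
  rw [← List.foldl_map (f := pvKeyA) (g := fun (d : PySem.Dict String Int) k => d.insert k (d.getD k 0 + 1)),
    PySem.Dict.foldl_insert_getD_add_one_eq_counter]
  refine Eq.trans (PySem.List.foldl_congr_mem _ _
      (fun res item => res + ((List.count item grid : Nat) : Int)) _ ?_) (Eq.trans ?_
      (PySem.List.foldl_congr_mem _ _
        (fun res j => res + ((List.count ((List.range grid.length).map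
          (fun k => (grid.getD k []).getD j 0)) grid : Nat) : Int)) _ ?_).symm)
  · -- A's loop body adds the count of the column's key among the row keys = count of the column among the rows
    intro acc item _
    by_cases hmem : pvKeyA item ∈ grid.map pvKeyA
    · have hcont : (PySem.Dict.counter (grid.map pvKeyA)).contains (pvKeyA item) = true := by
        rw [PySem.Dict.contains_counter]; exact List.contains_iff_mem.mpr hmem
      simp only [hcont, if_true, PySem.Dict.getD_counter]
      rw [List.count_map_of_injective _ _ pvKeyA_inj]
    · have hcont : (PySem.Dict.counter (grid.map pvKeyA)).contains (pvKeyA item) = false := by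
        rw [PySem.Dict.contains_counter]; simp [hmem]
      have hcnt : List.count item grid = 0 := by
        rw [List.count_eq_zero]
        intro hin
        exact hmem (List.mem_map_of_mem hin)
      simp [hcont, hcnt]
  · -- both loops are now the same sum over the columns
    rw [PySem.List.foldl_add, PySem.List.foldl_add, List.map_map]
    rfl
  · -- B's inner loop counts the rows equal to the column
    intro acc j _
    simp only []
    rw [PySem.List.foldl_beq_add_one]

-- ===== VERDICT (by name: the statement is the Claim_ definition above) =====
theorem equalPairs2_spec : Claim_equal_equalPairs2 := by
  intro grid _ _
  unfold Spec_equalPairs2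
  exact pvMainEq grid
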